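-- pv_equiv track=rewrite | github.com/dgoldman0/akashic | local_testing/test_css.py | ustr
-- ===== SOURCE A (Python) =====
-- def ustr(s):
--     """Build Forth lines that construct string s in _UB using UC."""
--     parts = ['UR']
--     for ch in s:
--         parts.append(f'{ord(ch)} UC')
--
--     full = " ".join(parts)
--     lines = []
--     while len(full) > 70:
--         split_at = full.rfind(' ', 0, 70)
--         if split_at == -1:
--             split_at = 70
--         lines.append(full[:split_at])
--         full = full[split_at:].lstrip()
--     if full:
--         lines.append(full)
--     return lines
-- ===== SOURCE B (Python) =====
-- def ustr(s):
--     """Build Forth lines that construct string s in _UB using UC."""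
--     # one-pass greedy word packing; no join-then-rescan
--     words = ['UR']
--     for ch in s:
--         words.append(str(ord(ch)))
--         words.append('UC')
--     rem = sum(len(w) for w in words) + len(words) - 1  # length of the joined string
--     lines = []
--     i = 0
--     while rem > 70:
--         line = words[i]
--         i += 1
--         while len(line) + 1 + len(words[i]) <= 69:
--             line += ' ' + words[i]
--             i += 1
--         lines.append(line)
--         rem -= len(line) + 1
--     if i < len(words):
--         lines.append(' '.join(words[i:]))
--     return lines
-- ===== Notes on version B (the rewrite author's own statement) =====
-- stated objective: faster
-- what changed: B never builds the full joined string and never rescans it with rfind per emitted line: it packs the word sequence (the reset marker, then the code number and call word per character) greedily into lines in one forward pass, tracking the remaining joined length so that a short remainder stays one line exactly as in A.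
import Mathlib
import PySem

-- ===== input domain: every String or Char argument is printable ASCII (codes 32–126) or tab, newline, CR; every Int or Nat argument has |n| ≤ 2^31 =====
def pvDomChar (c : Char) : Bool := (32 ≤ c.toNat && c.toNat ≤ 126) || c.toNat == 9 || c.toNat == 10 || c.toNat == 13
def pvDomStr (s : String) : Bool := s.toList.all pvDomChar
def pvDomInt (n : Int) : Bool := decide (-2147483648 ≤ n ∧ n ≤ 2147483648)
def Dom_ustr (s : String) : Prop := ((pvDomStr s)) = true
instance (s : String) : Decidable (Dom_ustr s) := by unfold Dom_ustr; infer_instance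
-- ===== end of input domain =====

-- B replaces A's join-then-rescan (rfind per emitted line) by a single greedy word-packing pass; objective: simpler/alternative.


-- ===== PORT A =====
-- the while-loop of A; fuel only makes the recursion total (fuel = len(full)+1 suffices, each
-- iteration strictly shortens full)
def ustrLoop : Nat → List Char → List (List Char)
  | 0, _ => []
  | fuel+1, full =>
    if full.length > 70 then
      let s0 : Int := PySem.Chars.rfindFrom full [' '] 0 (some 70)
      let split_at : Int := if s0 = -1 then 70 else s0
      PySem.Chars.slice full none (some split_at) ::
        ustrLoop fuel (PySem.Chars.lstrip (PySem.Chars.slice full (some split_at) none))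
    else if full = [] then [] else [full]

def ustr (s : String) : List String :=
  -- parts = ['UR']; for ch in s: parts.append(f'{ord(ch)} UC')
  let parts := s.toList.foldl
    (fun ps c => ps ++ [PySem.Int.toChars (c.toNat : Int) ++ [' ', 'U', 'C']]) [['U','R']]
  let full := PySem.Chars.join [' '] parts
  (ustrLoop (full.length + 1) full).map (fun l => String.ofList l)

-- ===== PORT B =====
-- inner while of B: extend the line while the next word still fits (line stays ≤ 69 chars)
def bFill : List Char → List (List Char) → List Char × List (List Char)
  | line, [] => (line, [])
  | line, w :: rest =>
    if line.length + 1 + w.length ≤ 69 then bFill (line ++ ' ' :: w) rest else (line, w :: rest)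

theorem bFill_snd_length : ∀ (rest : List (List Char)) (line : List Char),
    (bFill line rest).2.length ≤ rest.length := by
  intro rest
  induction rest with
  | nil => intro line; simp [bFill]
  | cons w rest ih =>
    intro line
    simp only [bFill]
    split
    · exact le_trans (ih _) (Nat.le_succ _)
    · simp

-- outer while of B: rem tracks the joined length of the remaining words
def bLoop (rem : Int) (ws : List (List Char)) : List (List Char) :=
  if rem > 70 then
    match ws with
    | [] => []
    | w :: rest =>
      let p := bFill w rest
      p.1 :: bLoop (rem - p.1.length - 1) p.2
  else if ws = [] then [] else [PySem.Chars.join [' '] ws]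
termination_by ws.length
decreasing_by exact Nat.lt_succ_of_le (bFill_snd_length _ _)

def ustr_alt (s : String) : List String :=
  let words := s.toList.foldl
    (fun ws c => ws ++ [PySem.Int.toChars (c.toNat : Int), ['U','C']]) [['U','R']]
  let rem : Int := ((words.map List.length).sum : Int) + words.length - 1
  (bLoop rem words).map (fun l => String.ofList l)

-- ===== PRECONDITION & SPEC =====
def Spec_ustr (s : String) (out : List String) : Prop := out = ustr_alt s
instance (s : String) (out : List String) : Decidable (Spec_ustr s out) := by unfold Spec_ustr; infer_instance

-- ===== CLAIM (what is proved, stated in full; the proofs are below) =====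
def Claim_equal_ustr : Prop := ∀ (s : String), Dom_ustr s → Spec_ustr s (ustr s)

-- ===== LEMMAS AND PROOFS =====

-- the word list both programs effectively join/pack
def wordsOf (cs : List Char) : List (List Char) :=
  ['U','R'] :: cs.flatMap (fun c => [PySem.Int.toChars (c.toNat : Int), ['U','C']])

def GoodWord (w : List Char) : Prop :=
  w ≠ [] ∧ w.length ≤ 69 ∧ ∀ c ∈ w, PySem.Chars.isspace c = false

theorem notspace_UR : ∀ c ∈ (['U','R'] : List Char), PySem.Chars.isspace c = false := by
  intro c hc
  rcases List.mem_cons.mp hc with rfl | hc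
  · decide
  rcases List.mem_cons.mp hc with rfl | hc
  · decide
  cases hc

theorem notspace_UC : ∀ c ∈ (['U','C'] : List Char), PySem.Chars.isspace c = false := by
  intro c hc
  rcases List.mem_cons.mp hc with rfl | hc
  · decide
  rcases List.mem_cons.mp hc with rfl | hc
  · decide
  cases hc

theorem digitChar_not_space (m : Nat) : PySem.Chars.isspace (Nat.digitChar m) = false := by
  match m with
  | 0 => decide
  | 1 => decide
  | 2 => decide
  | 3 => decide
  | 4 => decide
  | 5 => decide
  | 6 => decide
  | 7 => decide
  | 8 => decide
  | 9 => decide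
  | 10 => decide
  | 11 => decide
  | 12 => decide
  | 13 => decide
  | 14 => decide
  | 15 => decide
  | n+16 =>
    unfold Nat.digitChar
    rw [if_neg (by omega), if_neg (by omega), if_neg (by omega), if_neg (by omega),
      if_neg (by omega), if_neg (by omega), if_neg (by omega), if_neg (by omega),
      if_neg (by omega), if_neg (by omega), if_neg (by omega), if_neg (by omega),
      if_neg (by omega), if_neg (by omega), if_neg (by omega), if_neg (by omega)]
    decide

theorem toDigitsCore_mem (b : Nat) : ∀ (f n : Nat) (acc : List Char) (c : Char),
    c ∈ Nat.toDigitsCore b f n acc → c ∈ acc ∨ ∃ m, c = Nat.digitChar m := by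
  intro f
  induction f with
  | zero => intro n acc c h; exact Or.inl (by simpa [Nat.toDigitsCore] using h)
  | succ f ih =>
    intro n acc c h
    simp only [Nat.toDigitsCore] at h
    by_cases hb : n / b = 0
    · rw [if_pos hb] at h
      rcases List.mem_cons.mp h with rfl | h'
      · exact Or.inr ⟨_, rfl⟩
      · exact Or.inl h'
    · rw [if_neg hb] at h
      rcases ih (n / b) _ c h with h' | h'
      · rcases List.mem_cons.mp h' with rfl | h''
        · exact Or.inr ⟨_, rfl⟩
        · exact Or.inl h''
      · exact Or.inr h'

theorem toDigitsCore_ne_nil (b : Nat) : ∀ (f n : Nat) (acc : List Char),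
    0 < f ∨ acc ≠ [] → Nat.toDigitsCore b f n acc ≠ [] := by
  intro f
  induction f with
  | zero =>
    intro n acc h
    simpa [Nat.toDigitsCore] using h.resolve_left (by omega)
  | succ f ih =>
    intro n acc h
    simp only [Nat.toDigitsCore]
    by_cases hb : n / b = 0
    · rw [if_pos hb]; simp
    · rw [if_neg hb]; exact ih (n / b) _ (Or.inr (by simp))

theorem goodWord_toChars (n : Nat) (h : n < 1000) : GoodWord (PySem.Int.toChars (n : Int)) := by
  have hform : PySem.Int.toChars (n : Int) = Nat.toDigits 10 n := by
    simp [PySem.Int.toChars]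
  rw [hform]
  unfold Nat.toDigits
  refine ⟨toDigitsCore_ne_nil 10 _ _ _ (Or.inl (by omega)), ?_, ?_⟩
  · have hl : (Nat.toDigits 10 n).length ≤ 3 :=
      Nat.toDigits_length 10 n 3 (by omega) (by norm_num; omega)
    unfold Nat.toDigits at hl
    omega
  · intro c hc
    rcases toDigitsCore_mem 10 _ _ _ c hc with h' | ⟨m, rfl⟩
    · cases h'
    · exact digitChar_not_space m

theorem goodWord_wordsOf (cs : List Char) (h : ∀ c ∈ cs, pvDomChar c = true) :
    ∀ w ∈ wordsOf cs, GoodWord w := by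
  intro w hw
  simp only [wordsOf, List.mem_cons, List.mem_flatMap, List.not_mem_nil, or_false] at hw
  rcases hw with rfl | ⟨c, hc, hw⟩
  · exact ⟨by simp, by simp, notspace_UR⟩
  · have hdom := h c hc
    have hle : c.toNat < 127 := by
      simp only [pvDomChar, Bool.or_eq_true, Bool.and_eq_true, decide_eq_true_eq, beq_iff_eq] at hdom
      omega
    rcases hw with rfl | rfl
    · exact goodWord_toChars c.toNat (by omega)
    · exact ⟨by simp, by simp, notspace_UC⟩

theorem foldl_append_pair {α : Type} (f : α → List Char) (g : List Char) :
    ∀ (cs : List α) (init : List (List Char)),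
      cs.foldl (fun ws c => ws ++ [f c, g]) init = init ++ cs.flatMap (fun c => [f c, g]) := by
  intro cs
  induction cs with
  | nil => intro init; simp
  | cons c cs ih => intro init; simp [List.foldl_cons, ih]

theorem join_token_split (t : List Char) (rest : List (List Char)) :
    PySem.Chars.join [' '] ((t ++ [' ','U','C']) :: rest) =
      t ++ ' ' :: PySem.Chars.join [' '] (['U','C'] :: rest) := by
  cases rest with
  | nil => simp [PySem.Chars.join_singleton]
  | cons q r =>
    rw [PySem.Chars.join_cons_cons, PySem.Chars.join_cons_cons]
    simp

theorem join_parts_eq_words :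
    ∀ (cs : List Char) (w : List Char),
      PySem.Chars.join [' ']
        (w :: cs.map (fun c => PySem.Int.toChars (c.toNat : Int) ++ [' ','U','C'])) =
      PySem.Chars.join [' ']
        (w :: cs.flatMap (fun c => [PySem.Int.toChars (c.toNat : Int), ['U','C']])) := by
  intro cs
  induction cs with
  | nil => intro w; simp
  | cons c cs ih =>
    intro w
    simp only [List.map_cons, List.flatMap_cons, List.cons_append, List.nil_append]
    rw [PySem.Chars.join_cons_cons, join_token_split, ih (['U','C'])]
    rw [PySem.Chars.join_cons_cons, PySem.Chars.join_cons_cons]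
    simp

theorem join_length : ∀ (ws : List (List Char)), ws ≠ [] →
    (PySem.Chars.join [' '] ws).length + 1 = (ws.map List.length).sum + ws.length := by
  intro ws
  induction ws with
  | nil => intro h; cases h rfl
  | cons w rest ih =>
    intro _
    cases rest with
    | nil => simp [PySem.Chars.join_singleton]
    | cons q r =>
      rw [PySem.Chars.join_cons_cons]
      have h2 := ih (by simp)
      simp only [List.length_append, List.map_cons, List.sum_cons, List.length_cons,
        List.length_nil] at h2 ⊢
      omega

theorem join_ne_nil (w : List Char) (rest : List (List Char)) (hw : w ≠ []) :
    PySem.Chars.join [' '] (w :: rest) ≠ [] := by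
  cases rest with
  | nil => simpa [PySem.Chars.join_singleton]
  | cons q r => rw [PySem.Chars.join_cons_cons]; simp [hw]

theorem singleton_isPrefixOf (a : Char) (xs : List Char) :
    [a].isPrefixOf xs = true ↔ xs[0]? = some a := by
  cases xs with
  | nil =>
    rw [show ([a].isPrefixOf ([] : List Char)) = false from rfl]
    simp
  | cons x t =>
    rw [show ([a].isPrefixOf (x :: t)) = (a == x && true) from rfl]
    simp only [Bool.and_true, beq_iff_eq, List.getElem?_cons_zero, Option.some.injEq]
    exact eq_comm

theorem rfind_go_eq (s sub : List Char) (p : Nat) :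
    ∀ (k : Nat), p ≤ k → sub.isPrefixOf (s.drop p) = true →
      (∀ j, p < j → j ≤ k → sub.isPrefixOf (s.drop j) = false) →
      PySem.Chars.rfind.go s sub k = (p : Int) := by
  intro k
  induction k with
  | zero =>
    intro hpk hp _
    interval_cases p
    simp only [PySem.Chars.rfind.go, List.drop_zero] at *
    simp [hp]
  | succ k ih =>
    intro hpk hp hmax
    by_cases hpe : p = k + 1
    · subst hpe
      simp only [PySem.Chars.rfind.go]
      simp [hp]
    · have hpk' : p ≤ k := by omega
      have hfalse := hmax (k+1) (by omega) (le_refl _)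
      simp only [PySem.Chars.rfind.go, hfalse]
      simp only [Bool.false_eq_true, if_false]
      exact ih hpk' hp (fun j h1 h2 => hmax j h1 (by omega))

-- bFill: the emitted line is nonempty, ≤ 69 chars, and the remainder re-joins after one space
theorem bFill_spec : ∀ (rest : List (List Char)) (line : List Char),
    line ≠ [] → line.length ≤ 69 → (∀ w ∈ rest, GoodWord w) →
    (bFill line rest).1 ≠ [] ∧ (bFill line rest).1.length ≤ 69 ∧
    (∀ w ∈ (bFill line rest).2, GoodWord w) ∧
    (((bFill line rest).2 = [] ∧ (bFill line rest).1 = PySem.Chars.join [' '] (line :: rest)) ∨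
     (∃ w' r2, (bFill line rest).2 = w' :: r2 ∧
        70 ≤ (bFill line rest).1.length + 1 + w'.length ∧
        PySem.Chars.join [' '] (line :: rest) =
          (bFill line rest).1 ++ ' ' :: PySem.Chars.join [' '] ((bFill line rest).2))) := by
  intro rest
  induction rest with
  | nil =>
    intro line hne hlen _
    refine ⟨hne, hlen, by simp [bFill], Or.inl ?_⟩
    simp [bFill, PySem.Chars.join_singleton]
  | cons w rest ih =>
    intro line hne hlen hgood
    by_cases hc : line.length + 1 + w.length ≤ 69
    · have heq : bFill line (w :: rest) = bFill (line ++ ' ' :: w) rest := by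
        simp [bFill, hc]
      rw [heq]
      have hthis := ih (line ++ ' ' :: w) (by simp) (by simp; omega)
        (fun x hx => hgood x (List.mem_cons_of_mem _ hx))
      refine ⟨hthis.1, hthis.2.1, hthis.2.2.1, ?_⟩
      have hjoin : PySem.Chars.join [' '] (line :: w :: rest) =
          PySem.Chars.join [' '] ((line ++ ' ' :: w) :: rest) := by
        cases rest with
        | nil => rw [PySem.Chars.join_cons_cons]; simp [PySem.Chars.join_singleton]
        | cons q r =>
          rw [PySem.Chars.join_cons_cons, PySem.Chars.join_cons_cons,
            PySem.Chars.join_cons_cons]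
          simp
      rw [hjoin]
      exact hthis.2.2.2
    · have heq : bFill line (w :: rest) = (line, w :: rest) := by
        simp [bFill, hc]
      rw [heq]
      refine ⟨hne, hlen, hgood, Or.inr ⟨w, rest, rfl, ?_, ?_⟩⟩
      · show 70 ≤ line.length + 1 + w.length
        omega
      · show PySem.Chars.join [' '] (line :: w :: rest) =
          line ++ ' ' :: PySem.Chars.join [' '] (w :: rest)
        rw [PySem.Chars.join_cons_cons]
        simp

theorem dropWhile_join (ws : List (List Char)) (h : ∀ w ∈ ws, GoodWord w) (hne : ws ≠ []) :
    List.dropWhile PySem.Chars.isspace (PySem.Chars.join [' '] ws) =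
      PySem.Chars.join [' '] ws := by
  obtain ⟨w, rest, rfl⟩ := List.exists_cons_of_ne_nil hne
  have hw := h w (by simp)
  obtain ⟨c, t, rfl⟩ := List.exists_cons_of_ne_nil hw.1
  have hc : PySem.Chars.isspace c = false := hw.2.2 c (by simp)
  cases rest with
  | nil => rw [PySem.Chars.join_singleton]; simp [hc]
  | cons q r => rw [PySem.Chars.join_cons_cons]; simp [hc]

-- one A-iteration's rfind lands exactly at the end of the greedily packed line
theorem rfind_at_line (line w' : List Char) (Y : List Char)
    (hlen : line.length ≤ 69) (hmax : 70 ≤ line.length + 1 + w'.length)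
    (hwns : ∀ c ∈ w', PySem.Chars.isspace c = false)
    (hYlong : 70 < (line ++ ' ' :: (w' ++ Y)).length) :
    PySem.Chars.rfind (List.take 70 (line ++ ' ' :: (w' ++ Y))) [' '] = (line.length : Int) := by
  set full := line ++ ' ' :: (w' ++ Y) with hfull
  have htlen : (List.take 70 full).length = 70 := by
    simp only [List.length_take]; omega
  have hdropP : List.drop line.length full = ' ' :: (w' ++ Y) := by
    rw [hfull, List.drop_left]
  have hp : [' '].isPrefixOf ((List.take 70 full).drop line.length) = true := by
    rw [List.drop_take, hdropP]
    rw [singleton_isPrefixOf]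
    cases h70 : 70 - line.length with
    | zero => omega
    | succ m => simp
  have hmaxj : ∀ j, line.length < j → j ≤ (List.take 70 full).length →
      [' '].isPrefixOf ((List.take 70 full).drop j) = false := by
    intro j h1 h2
    rw [htlen] at h2
    rw [List.drop_take]
    by_cases hj : j = 70
    · subst hj
      simp
    · have hj69 : j ≤ 69 := by omega
      have hidx : j - line.length - 1 < w'.length := by omega
      have hdropj : List.drop j full = List.drop (j - line.length - 1) (w' ++ Y) := by
        have hsplitj : j = line.length + (j - line.length) := by omega
        rw [hsplitj, ← List.drop_drop, hdropP]
        cases hd : j - line.length with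
        | zero => omega
        | succ m =>
          simp only [List.drop_succ_cons]
          congr 1
          omega
      rw [hdropj]
      by_contra hcon
      simp only [Bool.not_eq_false] at hcon
      rw [singleton_isPrefixOf] at hcon
      have h0 : (List.take (70 - j) (List.drop (j - line.length - 1) (w' ++ Y)))[0]? =
          (List.drop (j - line.length - 1) (w' ++ Y))[0]? := by
        rw [List.getElem?_take]
        simp only [if_pos (by omega : (0:Nat) < 70 - j)]
      have hhead : (List.drop (j - line.length - 1) (w' ++ Y))[0]? =
          some (w'[j - line.length - 1]'hidx) := by
        rw [List.getElem?_drop]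
        simp only [Nat.add_zero]
        rw [List.getElem?_append_left hidx]
        exact List.getElem?_eq_getElem hidx
      rw [h0, hhead] at hcon
      simp only [Option.some.injEq] at hcon
      have hns := hwns (w'[j - line.length - 1]'hidx) (List.getElem_mem hidx)
      rw [hcon] at hns
      exact absurd hns (by decide)
  have hgo : PySem.Chars.rfind.go (List.take 70 full) [' '] (List.take 70 full).length
      = (line.length : Int) := by
    apply rfind_go_eq _ _ _ _ (by omega) hp
    intro j h1 h2
    exact hmaxj j h1 h2
  simpa [PySem.Chars.rfind] using hgo

-- main loop equivalence: A's string loop on the join equals B's word loop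
theorem loop_eq : ∀ (fuel : Nat) (ws : List (List Char)),
    (∀ w ∈ ws, GoodWord w) → ws ≠ [] →
    (PySem.Chars.join [' '] ws).length < fuel →
    ustrLoop fuel (PySem.Chars.join [' '] ws)
      = bLoop ((PySem.Chars.join [' '] ws).length : Int) ws := by
  intro fuel
  induction fuel with
  | zero => intro ws _ _ h; omega
  | succ fuel ih =>
    intro ws hgood hne hlen
    obtain ⟨w, rest, rfl⟩ := List.exists_cons_of_ne_nil hne
    set full := PySem.Chars.join [' '] (w :: rest) with hfulldef
    by_cases hbig : full.length > 70
    · have hw := hgood w (by simp)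
      have hspec := bFill_spec rest w hw.1 hw.2.1 (fun x hx => hgood x (by simp [hx]))
      set p := bFill w rest with hp
      rcases hspec.2.2.2 with ⟨hnil, hline⟩ | ⟨w', r2, hr, hmax, hsplit⟩
      · have hll := hspec.2.1
        rw [hline] at hll
        rw [hfulldef] at hbig
        omega
      · have hlline : p.1.length ≤ 69 := hspec.2.1
        have hw'good : GoodWord w' := hspec.2.2.1 w' (by rw [hr]; simp)
        have hjr : ∃ Y, PySem.Chars.join [' '] p.2 = w' ++ Y := by
          rw [hr]
          cases r2 with
          | nil => exact ⟨[], by simp [PySem.Chars.join_singleton]⟩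
          | cons q r =>
            rw [PySem.Chars.join_cons_cons]
            exact ⟨[' '] ++ PySem.Chars.join [' '] (q :: r), by simp⟩
        obtain ⟨Y, hY⟩ := hjr
        have hfull2 : full = p.1 ++ ' ' :: (w' ++ Y) := by
          rw [hfulldef, hsplit, hY]
        have hrfind : PySem.Chars.rfind (List.take 70 full) [' '] = (p.1.length : Int) := by
          rw [hfull2]
          exact rfind_at_line _ _ _ hlline (by omega) hw'good.2.2
            (by rw [← hfull2]; exact hbig)
        have hrf : PySem.Chars.rfindFrom full [' '] 0 (some 70) = (p.1.length : Int) := by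
          simp only [PySem.Chars.rfindFrom]
          have h1 : ¬ ((full.length : Int) < 70) := by omega
          simp only [h1, if_false]
          norm_num
          rw [show (Int.toNat 70) = 70 from rfl, hrfind]
          have hne2 : ¬((p.1.length : Int) = -1) := by omega
          rw [if_neg hne2]
        have hstep : ustrLoop (fuel+1) full =
            PySem.Chars.slice full none (some (p.1.length : Int)) ::
              ustrLoop fuel (PySem.Chars.lstrip (PySem.Chars.slice full (some (p.1.length : Int)) none)) := by
          simp only [ustrLoop, if_pos hbig, hrf]
          have hne1 : ¬ ((p.1.length : Int) = -1) := by omega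
          simp [hne1]
        rw [hstep]
        have htake : PySem.Chars.slice full none (some (p.1.length : Int)) = p.1 := by
          rw [PySem.Chars.slice_eq_listSlice, PySem.List.slice_to _ (by positivity)]
          rw [hfulldef, hsplit]
          simp only [Int.toNat_natCast]
          exact List.take_left
        have hdrop : PySem.Chars.slice full (some (p.1.length : Int)) none
            = ' ' :: PySem.Chars.join [' '] p.2 := by
          rw [PySem.Chars.slice_eq_listSlice, PySem.List.slice_from _ (by positivity)]
          rw [hfulldef, hsplit]
          simp only [Int.toNat_natCast]
          exact List.drop_left
        have hp2ne : p.2 ≠ [] := by rw [hr]; simp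
        have hlstrip : PySem.Chars.lstrip (PySem.Chars.slice full (some (p.1.length : Int)) none)
            = PySem.Chars.join [' '] p.2 := by
          rw [hdrop]
          simp only [PySem.Chars.lstrip]
          rw [List.dropWhile_cons]
          simp only [show PySem.Chars.isspace ' ' = true from by decide, if_pos]
          exact dropWhile_join p.2 hspec.2.2.1 hp2ne
        rw [htake, hlstrip]
        have hlens : full.length = p.1.length + 1 + (PySem.Chars.join [' '] p.2).length := by
          rw [hfulldef, hsplit]
          simp only [List.length_append, List.length_cons]
          omega
        rw [show bLoop ((full.length : Int)) (w :: rest) =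
            p.1 :: bLoop ((full.length : Int) - p.1.length - 1) p.2 from ?_]
        · congr 1
          have hcast : ((full.length : Int)) - p.1.length - 1
              = ((PySem.Chars.join [' '] p.2).length : Int) := by
            rw [hlens]; push_cast; ring
          rw [hcast]
          apply ih p.2 hspec.2.2.1 hp2ne
          have hfix : (PySem.Chars.join [' '] (w :: rest)).length = full.length := by
            rw [hfulldef]
          omega
        · rw [bLoop]
          have hbig' : ((full.length : Int)) > 70 := by exact_mod_cast hbig
          simp only [if_pos hbig']
          rw [← hp]
    · have hfne : full ≠ [] := join_ne_nil w rest (hgood w (by simp)).1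
      have h70 : ¬ ((full.length : Int) > 70) := by omega
      simp only [ustrLoop, if_neg hbig, if_neg hfne]
      rw [bLoop]
      simp only [if_neg h70]
      simp [hne, hfulldef]

theorem words_foldl (cs : List Char) :
    cs.foldl (fun ws c => ws ++ [PySem.Int.toChars (c.toNat : Int), ['U','C']]) [['U','R']]
      = wordsOf cs := by
  rw [foldl_append_pair]
  rfl

theorem full_eq (cs : List Char) :
    PySem.Chars.join [' ']
      (cs.foldl (fun ps c => ps ++ [PySem.Int.toChars (c.toNat : Int) ++ [' ','U','C']]) [['U','R']])
      = PySem.Chars.join [' '] (wordsOf cs) := by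
  rw [PySem.List.foldl_append_singleton_eq_map]
  simp only [List.singleton_append]
  exact join_parts_eq_words cs ['U','R']

-- ===== VERDICT (by name: the statement is the Claim_ definition above) =====
theorem ustr_spec : Claim_equal_ustr := by
  intro s hdom
  unfold Spec_ustr ustr ustr_alt
  simp only []
  rw [full_eq, words_foldl]
  congr 1
  have hgood : ∀ w ∈ wordsOf s.toList, GoodWord w := by
    apply goodWord_wordsOf
    intro c hc
    have hd : pvDomStr s = true := hdom
    simp only [pvDomStr, List.all_eq_true] at hd
    exact hd c hc
  have hne : wordsOf s.toList ≠ [] := by simp [wordsOf]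
  have hrem : ((((wordsOf s.toList).map List.length).sum : Int) + (wordsOf s.toList).length - 1)
      = ((PySem.Chars.join [' '] (wordsOf s.toList)).length : Int) := by
    have hj := join_length (wordsOf s.toList) hne
    omega
  rw [hrem]
  exact loop_eq _ _ hgood hne (Nat.lt_succ_self _)
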